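-- pv_equiv track=rewrite | github.com/aralfaruqi/alteraproject | Data Structure/Problem Pagi/1 - Mengelompokan Angka.py | mengelompokkanAngka
-- ===== SOURCE A (Python) =====
-- def mengelompokkanAngka(arr):
--     list_genap = []
--     list_ganjil = []
--     list_times3 = []
--     list_hasil = []
--
--     for i in arr:
--         if i%2 == 0 and i%3 !=0 :
--             list_genap.append(i)
--         elif i%2 == 1 and i%3 != 0:
--             list_ganjil.append(i)
--         elif i%3 == 0:
--             list_times3.append(i)
--
--     arr = [list_genap, list_ganjil,list_times3]
--     return arr
-- ===== SOURCE B (Python) =====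
-- def mengelompokkanAngka(arr):
--     return [
--         [i for i in arr if i % 2 == 0 and i % 3 != 0],
--         [i for i in arr if i % 2 == 1 and i % 3 != 0],
--         [i for i in arr if i % 3 == 0],
--     ]
-- ===== Notes on version B (the rewrite author's own statement) =====
-- stated objective: simpler
-- what changed: Replaces the single stateful loop with an if/elif chain and three mutable accumulators by three independent filtering list comprehensions, one per bucket.
import Mathlib
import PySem

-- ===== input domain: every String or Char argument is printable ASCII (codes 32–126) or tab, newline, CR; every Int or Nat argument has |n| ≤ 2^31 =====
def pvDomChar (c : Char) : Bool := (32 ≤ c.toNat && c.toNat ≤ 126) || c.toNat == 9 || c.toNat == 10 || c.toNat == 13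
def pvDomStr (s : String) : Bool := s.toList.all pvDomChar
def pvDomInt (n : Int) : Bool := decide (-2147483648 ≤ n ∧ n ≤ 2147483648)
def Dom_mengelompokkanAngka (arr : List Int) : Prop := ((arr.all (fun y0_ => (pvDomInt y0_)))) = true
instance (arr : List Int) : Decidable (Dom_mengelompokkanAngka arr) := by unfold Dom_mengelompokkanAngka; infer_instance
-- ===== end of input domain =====

-- B replaces A's single stateful loop with three independent filter passes (simpler decomposition).


-- ===== PORT A =====
-- fold over arr carrying the three accumulator lists, appending at the back (Python append)
def mengelompokkanAngka (arr : List Int) : List (List Int) :=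
  let st := arr.foldl (fun (st : List Int × List Int × List Int) i =>
      if PySem.Int.mod i 2 = 0 ∧ PySem.Int.mod i 3 ≠ 0 then
        (st.1 ++ [i], st.2.1, st.2.2)
      else if PySem.Int.mod i 2 = 1 ∧ PySem.Int.mod i 3 ≠ 0 then
        (st.1, st.2.1 ++ [i], st.2.2)
      else if PySem.Int.mod i 3 = 0 then
        (st.1, st.2.1, st.2.2 ++ [i])
      else (st.1, st.2.1, st.2.2)) ([], [], [])
  [st.1, st.2.1, st.2.2]

-- ===== PORT B =====
def mengelompokkanAngka_alt (arr : List Int) : List (List Int) :=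
  [ arr.filter (fun i => PySem.Int.mod i 2 == 0 && PySem.Int.mod i 3 != 0),
    arr.filter (fun i => PySem.Int.mod i 2 == 1 && PySem.Int.mod i 3 != 0),
    arr.filter (fun i => PySem.Int.mod i 3 == 0) ]

-- ===== PRECONDITION & SPEC =====
def Spec_mengelompokkanAngka (arr : List Int) (out : List (List Int)) : Prop := out = mengelompokkanAngka_alt arr
instance (arr : List Int) (out : List (List Int)) : Decidable (Spec_mengelompokkanAngka arr out) := by unfold Spec_mengelompokkanAngka; infer_instance

-- ===== CLAIM (what is proved, stated in full; the proofs are below) =====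
def Claim_equal_mengelompokkanAngka : Prop := ∀ (arr : List Int), Dom_mengelompokkanAngka arr → Spec_mengelompokkanAngka arr (mengelompokkanAngka arr)

-- ===== LEMMAS AND PROOFS =====

-- loop invariant: the fold from any accumulators equals those accumulators with the filters appended
theorem mengelompokkan_fold (arr : List Int) (g j t : List Int) :
    arr.foldl (fun (st : List Int × List Int × List Int) i =>
      if PySem.Int.mod i 2 = 0 ∧ PySem.Int.mod i 3 ≠ 0 then
        (st.1 ++ [i], st.2.1, st.2.2)
      else if PySem.Int.mod i 2 = 1 ∧ PySem.Int.mod i 3 ≠ 0 then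
        (st.1, st.2.1 ++ [i], st.2.2)
      else if PySem.Int.mod i 3 = 0 then
        (st.1, st.2.1, st.2.2 ++ [i])
      else (st.1, st.2.1, st.2.2)) (g, j, t)
    = (g ++ arr.filter (fun i => PySem.Int.mod i 2 == 0 && PySem.Int.mod i 3 != 0),
       j ++ arr.filter (fun i => PySem.Int.mod i 2 == 1 && PySem.Int.mod i 3 != 0),
       t ++ arr.filter (fun i => PySem.Int.mod i 3 == 0)) := by
  induction arr generalizing g j t with
  | nil => simp
  | cons x xs ih =>
    simp only [List.foldl_cons, List.filter_cons]
    by_cases h2 : PySem.Int.mod x 2 = 0 ∧ PySem.Int.mod x 3 ≠ 0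
    · rw [if_pos h2, ih]
      have hnd : ¬ (3:Int) ∣ x := fun hh => h2.2 ((PySem.Int.mod_eq_zero_iff_dvd x 3).mpr hh)
      have e1 : (PySem.Int.mod x 2 == 0 && PySem.Int.mod x 3 != 0) = true := by
        rw [h2.1]; simp [h2.2, hnd]
      have e2 : (PySem.Int.mod x 2 == 1 && PySem.Int.mod x 3 != 0) = false := by
        rw [h2.1]; simp
      have e3 : (PySem.Int.mod x 3 == 0) = false := by
        simp [h2.2, hnd]
      rw [e1, e2, e3]
      simp
    · by_cases h1 : PySem.Int.mod x 2 = 1 ∧ PySem.Int.mod x 3 ≠ 0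
      · rw [if_neg h2, if_pos h1, ih]
        have hnd : ¬ (3:Int) ∣ x := fun hh => h1.2 ((PySem.Int.mod_eq_zero_iff_dvd x 3).mpr hh)
        have e1 : (PySem.Int.mod x 2 == 0 && PySem.Int.mod x 3 != 0) = false := by
          rw [h1.1]; simp
        have e2 : (PySem.Int.mod x 2 == 1 && PySem.Int.mod x 3 != 0) = true := by
          rw [h1.1]; simp [h1.2, hnd]
        have e3 : (PySem.Int.mod x 3 == 0) = false := by
          simp [h1.2, hnd]
        rw [e1, e2, e3]
        simp
      · by_cases h3 : PySem.Int.mod x 3 = 0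
        · rw [if_neg h2, if_neg h1, if_pos h3, ih]
          have e1 : (PySem.Int.mod x 2 == 0 && PySem.Int.mod x 3 != 0) = false := by
            rw [h3]; simp
          have e2 : (PySem.Int.mod x 2 == 1 && PySem.Int.mod x 3 != 0) = false := by
            rw [h3]; simp
          have e3 : (PySem.Int.mod x 3 == 0) = true := by
            rw [h3]; simp
          rw [e1, e2, e3]
          simp
        · -- impossible: x%3 ≠ 0 while x%2 is neither 0 nor 1
          exfalso
          rcases PySem.Int.mod_two_eq x with h | h
          · exact h2 ⟨h, h3⟩
          · exact h1 ⟨h, h3⟩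

-- ===== VERDICT (by name: the statement is the Claim_ definition above) =====
theorem mengelompokkanAngka_spec : Claim_equal_mengelompokkanAngka := by
  intro arr _
  unfold Spec_mengelompokkanAngka mengelompokkanAngka mengelompokkanAngka_alt
  simp only [mengelompokkan_fold]
  simp
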